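-- pv_equiv track=rewrite | github.com/kun0906/flr | flr/data_partition.py | get_parts_info
-- ===== SOURCE A (Python) =====
-- import collections
--
-- def get_parts_info(parts):
--     y2_dict = {}
--     N2 = 0
--     for X_, y_ in parts:
--         for k, v in collections.Counter(y_).items():
--             if k not in y2_dict.keys():
--                 N2 += v
--                 y2_dict[k] = v
--             else:
--                 N2 += v
--                 y2_dict[k] += v
--
--     return N2, y2_dict
-- ===== SOURCE B (Python) =====
-- def get_parts_info(parts):
--     # Staged: flatten all labels, fix key order by first occurrence, then count per key.
--     labels = [lab for _, y_ in parts for lab in y_]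
--     order = list(dict.fromkeys(labels))
--     return len(labels), {k: labels.count(k) for k in order}
-- ===== Notes on version B (the rewrite author's own statement) =====
-- stated objective: simpler
-- what changed: Replaces the incremental per-part Counter-and-merge accumulation with three declarative stages: flatten every label into one list, take first-occurrence distinct keys via dict.fromkeys, and build the result dict by counting each distinct key with list.count (total = len of the flattened list).
import Mathlib
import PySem

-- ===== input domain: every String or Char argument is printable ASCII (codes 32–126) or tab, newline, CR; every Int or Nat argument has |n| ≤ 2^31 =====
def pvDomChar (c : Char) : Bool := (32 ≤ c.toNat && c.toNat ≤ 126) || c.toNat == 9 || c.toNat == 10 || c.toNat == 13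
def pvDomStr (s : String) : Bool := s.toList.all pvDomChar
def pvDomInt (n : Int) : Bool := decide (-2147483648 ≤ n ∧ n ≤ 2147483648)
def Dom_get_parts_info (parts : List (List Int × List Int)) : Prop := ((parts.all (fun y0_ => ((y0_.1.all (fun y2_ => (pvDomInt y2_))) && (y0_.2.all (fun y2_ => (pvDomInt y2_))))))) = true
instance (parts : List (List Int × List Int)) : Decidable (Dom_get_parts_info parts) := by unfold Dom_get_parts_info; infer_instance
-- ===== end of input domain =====

-- B is a simpler staged computation (flatten, dedupe, count per key) instead of A's
-- incremental Counter-and-merge loop; equivalence of return values is proved.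

-- ===== PORT A =====
-- inner loop body of A: 'if k not in y2_dict: N2 += v; y2_dict[k] = v else: N2 += v; y2_dict[k] += v'
def pvStepA (st : Int × PySem.Dict Int Int) (kv : Int × Int) : Int × PySem.Dict Int Int :=
  if st.2.contains kv.1 = false then (st.1 + kv.2, st.2.insert kv.1 kv.2)
  else (st.1 + kv.2, st.2.insert kv.1 (st.2.getD kv.1 0 + kv.2))

def get_parts_info (parts : List (List Int × List Int)) : Int × (List (Int × Int)) :=
  let r := parts.foldl (fun st p => (PySem.Dict.counter p.2).items.foldl pvStepA st)
    ((0 : Int), (PySem.Dict.empty : PySem.Dict Int Int))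
  (r.1, r.2.items)

-- ===== PORT B =====
-- B: labels = flatten; order = list(dict.fromkeys(labels)); dict comprehension over order with labels.count
def get_parts_info_alt (parts : List (List Int × List Int)) : Int × (List (Int × Int)) :=
  let labels := parts.flatMap (fun p => p.2)
  let order := PySem.List.dedup labels
  let d := order.foldl (fun d k => d.insert k ((labels.count k : Int))) (PySem.Dict.empty : PySem.Dict Int Int)
  ((labels.length : Int), d.items)

-- ===== PRECONDITION & SPEC =====
def Spec_get_parts_info (parts : List (List Int × List Int)) (out : Int × (List (Int × Int))) : Prop := out = get_parts_info_alt parts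
instance (parts : List (List Int × List Int)) (out : Int × (List (Int × Int))) : Decidable (Spec_get_parts_info parts out) := by unfold Spec_get_parts_info; infer_instance

-- ===== CLAIM (what is proved, stated in full; the proofs are below) =====
def Claim_equal_get_parts_info : Prop := ∀ (parts : List (List Int × List Int)), Dom_get_parts_info parts → Spec_get_parts_info parts (get_parts_info parts)

-- ===== LEMMAS AND PROOFS =====

-- elementwise step: the direct accumulation both sides reduce to in the proof
def pvStepE (st : Int × PySem.Dict Int Int) (lab : Int) : Int × PySem.Dict Int Int :=
  (st.1 + 1, st.2.insert lab (st.2.getD lab 0 + 1))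

-- A's two branches compute the same update (a fresh key has getD = 0).
lemma pvStepA_eq (st : Int × PySem.Dict Int Int) (kv : Int × Int) :
    pvStepA st kv = (st.1 + kv.2, st.2.insert kv.1 (st.2.getD kv.1 0 + kv.2)) := by
  unfold pvStepA
  by_cases h : st.2.contains kv.1 = false
  · rw [if_pos h, PySem.Dict.getD_of_not_contains st.2 0 h, zero_add]
  · rw [if_neg h]

lemma fst_foldA (L : List (Int × Int)) : ∀ (st : Int × PySem.Dict Int Int),
    (L.foldl pvStepA st).1 = st.1 + (L.map (·.2)).sum := by
  induction L with
  | nil => intro st; simp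
  | cons kv L ih => intro st; simp [List.foldl_cons, ih, pvStepA_eq]; ring

lemma snd_foldA (L : List (Int × Int)) : ∀ (st : Int × PySem.Dict Int Int),
    (L.foldl pvStepA st).2 = L.foldl (fun d kv => d.insert kv.1 (d.getD kv.1 0 + kv.2)) st.2 := by
  induction L with
  | nil => intro st; rfl
  | cons kv L ih => intro st; simp [List.foldl_cons, ih, pvStepA_eq]

lemma fst_foldE (y : List Int) : ∀ (st : Int × PySem.Dict Int Int),
    (y.foldl pvStepE st).1 = st.1 + y.length := by
  induction y with
  | nil => intro st; simp
  | cons x y ih => intro st; simp [List.foldl_cons, ih, pvStepE]; ring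

lemma snd_foldE (y : List Int) : ∀ (st : Int × PySem.Dict Int Int),
    (y.foldl pvStepE st).2 = y.foldl (fun d x => d.insert x (d.getD x 0 + 1)) st.2 := by
  induction y with
  | nil => intro st; rfl
  | cons x y ih => intro st; simp [List.foldl_cons, ih, pvStepE]

-- getD after A's merge fold: adds the sum of values whose key is x.
lemma getD_foldA (L : List (Int × Int)) : ∀ (d : PySem.Dict Int Int) (x : Int),
    (L.foldl (fun d kv => d.insert kv.1 (d.getD kv.1 0 + kv.2)) d).getD x 0
      = d.getD x 0 + ((L.filter (fun kv => kv.1 == x)).map (·.2)).sum := by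
  induction L with
  | nil => intro d x; simp
  | cons kv L ih =>
    intro d x
    by_cases h : kv.1 = x
    · simp [List.foldl_cons, ih, h, PySem.Dict.getD_insert_self]
      ring
    · simp only [List.foldl_cons, ih, List.filter_cons]
      rw [PySem.Dict.getD_insert]
      simp [h, Ne.symm h]

lemma filter_eq_of_nodup (x : Int) (s : List Int) (h : s.Nodup) :
    s.filter (fun k => k == x) = if x ∈ s then [x] else [] := by
  induction s with
  | nil => simp
  | cons a s ih =>
    simp only [List.nodup_cons] at h
    by_cases hax : a = x
    · subst hax
      simp [h.1, ih h.2]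
    · simp [hax, ih h.2, Ne.symm hax]

-- sum of the counts over the distinct elements = length
lemma sum_counts (y : List Int) :
    (((PySem.Set.ofList y).map (fun k => (y.count k : Int))).sum) = (y.length : Int) := by
  have hperm : (PySem.Set.ofList y).Perm y.dedup := by
    rw [List.perm_ext_iff_of_nodup (PySem.Set.nodup_ofList y) (List.nodup_dedup y)]
    intro a
    rw [PySem.Set.mem_ofList, List.mem_dedup]
  calc ((PySem.Set.ofList y).map (fun k => (y.count k : Int))).sum
      = (y.dedup.map (fun k => (y.count k : Int))).sum := (hperm.map _).sum_eq
    _ = ((y.dedup.map (fun k => y.count k)).map (fun n : Nat => (n : Int))).sum := by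
        rw [List.map_map]; rfl
    _ = (((y.dedup.map (fun k => y.count k)).sum : Nat) : Int) := (Nat.cast_list_sum _).symm
    _ = (y.length : Int) := by rw [List.sum_map_count_dedup_eq_length]

-- one part: A's Counter-then-merge equals the direct elementwise accumulation
lemma part_eq (y : List Int) (st : Int × PySem.Dict Int Int) (hnd : st.2.keys.Nodup) :
    (PySem.Dict.counter y).items.foldl pvStepA st = y.foldl pvStepE st := by
  obtain ⟨N, d⟩ := st
  have hA1 : ((PySem.Dict.counter y).items.foldl pvStepA (N, d)).1 = N + y.length := by
    rw [fst_foldA, PySem.Dict.items_counter, List.map_map]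
    have he : ((fun x : Int × Int => x.2) ∘ fun k => (k, (y.count k : Int)))
        = fun k => (y.count k : Int) := rfl
    rw [he, sum_counts]
  have hB1 : (y.foldl pvStepE (N, d)).1 = N + y.length := fst_foldE y (N, d)
  have hA2 := snd_foldA (PySem.Dict.counter y).items (N, d)
  have hB2 := snd_foldE y (N, d)
  set dA := ((PySem.Dict.counter y).items.foldl pvStepA (N, d)).2 with hdA
  set dB := (y.foldl pvStepE (N, d)).2 with hdB
  have hkA : dA.keys = PySem.Set.update d.keys y := by
    rw [hA2]
    dsimp only
    rw [PySem.Dict.keys_foldl_insert_key _ Prod.fst (fun d kv => d.getD kv.1 0 + kv.2) d]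
    rw [PySem.Dict.items_counter, List.map_map]
    have he : (Prod.fst ∘ fun k : Int => (k, (y.count k : Int))) = fun k => k := rfl
    rw [he, List.map_id_fun', id_eq]
    rw [PySem.Set.update_eq_append_filter, PySem.Set.update_eq_append_filter,
      PySem.Set.ofList_ofList]
  have hkB : dB.keys = PySem.Set.update d.keys y := by
    rw [hB2]
    dsimp only
    rw [PySem.Dict.keys_foldl_insert]
  have hndA : dA.keys.Nodup := by
    rw [hA2]; exact PySem.Dict.nodup_keys_foldl_insert_key _ _ _ _ hnd
  have hndB : dB.keys.Nodup := by
    rw [hB2]; exact PySem.Dict.nodup_keys_foldl_insert _ _ _ hnd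
  have hget : ∀ x : Int, dA.getD x 0 = dB.getD x 0 := by
    intro x
    rw [hA2, hB2]
    dsimp only
    rw [getD_foldA, PySem.Dict.getD_foldl_insert_add_one]
    congr 1
    rw [PySem.Dict.items_counter]
    rw [List.filter_map]
    have he3 : ((fun kv : Int × Int => kv.1 == x) ∘ fun k : Int => (k, (y.count k : Int)))
        = fun k : Int => k == x := rfl
    rw [he3, filter_eq_of_nodup x _ (PySem.Set.nodup_ofList y)]
    by_cases hx : x ∈ PySem.Set.ofList y
    · simp [hx]
    · rw [PySem.Set.mem_ofList] at hx
      simp [PySem.Set.mem_ofList, hx, List.count_eq_zero_of_not_mem hx]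
  have hd : dA = dB := by
    apply PySem.Dict.ext
    rw [PySem.Dict.items_eq_map_keys dA hndA 0, PySem.Dict.items_eq_map_keys dB hndB 0,
      hkA, hkB]
    exact List.map_congr_left (fun k _ => by rw [hget k])
  have e1 : (PySem.Dict.counter y).items.foldl pvStepA (N, d)
      = (((PySem.Dict.counter y).items.foldl pvStepA (N, d)).1,
         ((PySem.Dict.counter y).items.foldl pvStepA (N, d)).2) := rfl
  have e2 : y.foldl pvStepE (N, d) = ((y.foldl pvStepE (N, d)).1, (y.foldl pvStepE (N, d)).2) := rfl
  rw [e1, e2, hA1, hB1, ← hdA, ← hdB, hd]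

-- a fold inserting distinct fresh keys appends their items in order
lemma items_fold_fresh (f : Int → Int) : ∀ (l : List Int) (d : PySem.Dict Int Int),
    l.Nodup → (∀ x ∈ l, d.contains x = false) →
    (l.foldl (fun d k => d.insert k (f k)) d).items = d.items ++ l.map (fun k => (k, f k)) := by
  intro l
  induction l with
  | nil => intro d _ _; simp
  | cons a l ih =>
    intro d hnd hfresh
    simp only [List.nodup_cons] at hnd
    simp only [List.foldl_cons, List.map_cons]
    rw [ih (d.insert a (f a)) hnd.2 ?_]
    · rw [PySem.Dict.items_insert_of_not_contains _ _ (hfresh a (List.mem_cons_self))]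
      simp
    · intro x hx
      rw [PySem.Dict.contains_eq_decide_mem_keys,
        PySem.Dict.keys_insert_of_not_contains _ _ (hfresh a (List.mem_cons_self))]
      have hxa : x ≠ a := fun h => hnd.1 (h ▸ hx)
      have : x ∉ d.keys := by
        have := hfresh x (List.mem_cons_of_mem _ hx)
        rw [PySem.Dict.contains_eq_decide_mem_keys] at this
        simpa using this
      simp [hxa, this]

-- A's whole loop equals the elementwise fold over the flattened labels
lemma outer_eq (parts : List (List Int × List Int)) :
    ∀ (st : Int × PySem.Dict Int Int), st.2.keys.Nodup →
    parts.foldl (fun st p => (PySem.Dict.counter p.2).items.foldl pvStepA st) st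
      = (parts.flatMap (fun p => p.2)).foldl pvStepE st := by
  induction parts with
  | nil => intro st _; rfl
  | cons p parts ih =>
    intro st hnd
    simp only [List.foldl_cons, List.flatMap_cons, List.foldl_append]
    rw [part_eq p.2 st hnd]
    apply ih
    rw [snd_foldE]
    exact PySem.Dict.nodup_keys_foldl_insert _ _ _ hnd

-- ===== VERDICT (by name: the statement is the Claim_ definition above) =====
theorem get_parts_info_spec : Claim_equal_get_parts_info := by
  intro parts _
  unfold Spec_get_parts_info get_parts_info get_parts_info_alt
  rw [outer_eq parts _ (by simp [PySem.Dict.keys_empty])]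
  set labels := parts.flatMap (fun p => p.2) with hl
  -- first components
  have h1 : (labels.foldl pvStepE ((0 : Int), PySem.Dict.empty)).1 = (labels.length : Int) := by
    rw [fst_foldE]; ring
  -- second components: elementwise counting dict = B's staged per-key dict
  have h2 : (labels.foldl pvStepE ((0 : Int), PySem.Dict.empty)).2.items
      = ((PySem.List.dedup labels).foldl
          (fun d k => d.insert k ((labels.count k : Int))) PySem.Dict.empty).items := by
    rw [snd_foldE, PySem.Dict.foldl_insert_getD_add_one_eq_counter, PySem.Dict.items_counter]
    rw [items_fold_fresh (fun k => (labels.count k : Int)) (PySem.List.dedup labels)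
      PySem.Dict.empty (by simp [PySem.List.dedup_eq_ofList, PySem.Set.nodup_ofList])
      (fun x _ => PySem.Dict.contains_empty x)]
    simp [PySem.List.dedup_eq_ofList, PySem.Dict.empty]
  simp only []
  rw [Prod.ext_iff]
  exact ⟨h1, h2⟩
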